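-- pv_equiv track=rewrite | github.com/ykhan007/Final-Question-2 | q2_final.py | orient_grid
-- ===== SOURCE A (Python) =====
-- def orient_grid(grid, corner):
--     """Flip the base grid to match the chosen corner."""
--     corner = corner.upper()
--     n = len(grid)
--
--     # start from a copy so we don't mutate original
--     g = [row[:] for row in grid]
--
--     if corner == "TL":
--         # no change
--         return g
--
--     if corner == "BL":
--         # flip vertically
--         g.reverse()
--         return g
--
--     if corner == "TR":
--         # flip horizontally
--         return [list(reversed(row)) for row in g]
--
--     if corner == "BR":
--         # flip vertically then horizontally
--         g.reverse()
--         return [list(reversed(row)) for row in g]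
--
--     # if somehow invalid, just return as-is
--     return g
-- ===== SOURCE B (Python) =====
-- def orient_grid(grid, corner):
--     """Flip the base grid to match the chosen corner."""
--     c = corner.upper()
--     flip_v = c in ("BL", "BR")
--     flip_h = c in ("TR", "BR")
--     out = []
--     for row in grid:
--         new_row = []
--         for x in row:
--             if flip_h:
--                 new_row.insert(0, x)
--             else:
--                 new_row.append(x)
--         if flip_v:
--             out.insert(0, new_row)
--         else:
--             out.append(new_row)
--     return out
-- ===== Notes on version B (the rewrite author's own statement) =====
-- stated objective: alternative
-- what changed: Instead of copying the grid and applying staged whole-list reversals per corner branch, B makes one pass over the grid building the result with accumulators, prepending each element/row when the corresponding flip is needed and appending otherwise; invalid corners fall through as plain appends.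
import Mathlib
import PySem

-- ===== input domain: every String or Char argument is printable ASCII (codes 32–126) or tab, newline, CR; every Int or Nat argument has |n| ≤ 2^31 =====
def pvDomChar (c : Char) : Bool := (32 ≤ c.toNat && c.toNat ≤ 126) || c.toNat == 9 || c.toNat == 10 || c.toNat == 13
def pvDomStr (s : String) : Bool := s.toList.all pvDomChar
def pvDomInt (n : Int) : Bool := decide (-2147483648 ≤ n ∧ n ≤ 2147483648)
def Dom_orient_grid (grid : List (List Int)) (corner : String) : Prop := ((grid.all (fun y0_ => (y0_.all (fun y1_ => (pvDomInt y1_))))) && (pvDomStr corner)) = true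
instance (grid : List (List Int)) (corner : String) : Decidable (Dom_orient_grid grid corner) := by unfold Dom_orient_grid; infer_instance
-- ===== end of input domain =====

-- B replaces A's copy-then-reverse corner branches by a single accumulator pass that prepends (or appends) each element and each row; alternative decomposition, no speed claim.

-- ===== PORT A =====
def orient_grid (grid : List (List Int)) (corner : String) : List (List Int) :=
  let corner := PySem.Str.upper corner
  -- g = [row[:] for row in grid]  (copy; value-identical in Lean)
  let g := grid.map (fun row => row)
  if corner = "TL" then g
  else if corner = "BL" then g.reverse
  else if corner = "TR" then g.map (fun row => row.reverse)
  else if corner = "BR" then g.reverse.map (fun row => row.reverse)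
  else g

-- ===== PORT B =====
def orient_grid_alt (grid : List (List Int)) (corner : String) : List (List Int) :=
  let c := PySem.Str.upper corner
  let flipV : Bool := c == "BL" || c == "BR"
  let flipH : Bool := c == "TR" || c == "BR"
  grid.foldl (fun out row =>
    let newRow := row.foldl (fun acc x => if flipH then x :: acc else acc ++ [x]) []
    if flipV then newRow :: out else out ++ [newRow]) []

-- ===== PRECONDITION & SPEC =====
def Spec_orient_grid (grid : List (List Int)) (corner : String) (out : List (List Int)) : Prop := out = orient_grid_alt grid corner
instance (grid : List (List Int)) (corner : String) (out : List (List Int)) : Decidable (Spec_orient_grid grid corner out) := by unfold Spec_orient_grid; infer_instance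

-- ===== CLAIM (what is proved, stated in full; the proofs are below) =====
def Claim_equal_orient_grid : Prop := ∀ (grid : List (List Int)) (corner : String), Dom_orient_grid grid corner → Spec_orient_grid grid corner (orient_grid grid corner)

-- ===== LEMMAS AND PROOFS =====
theorem pv_foldl_flip {α : Type} (b : Bool) (l acc : List α) :
    l.foldl (fun a x => if b then x :: a else a ++ [x]) acc
      = (if b then l.reverse ++ acc else acc ++ l) := by
  induction l generalizing acc <;> cases b <;> simp_all

theorem pv_outer (f : List Int → List Int) (fv : Bool) (grid acc : List (List Int)) :
    grid.foldl (fun out row => if fv then f row :: out else out ++ [f row]) acc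
      = (if fv then (grid.map f).reverse ++ acc else acc ++ grid.map f) := by
  induction grid generalizing acc <;> cases fv <;> simp_all

theorem pv_flat_map {α β : Type} (f : α → List β) (l : List α) :
    (l.map (fun x => [f x])).flatten = l.map f := by
  induction l <;> simp_all

theorem orient_grid_eq (grid : List (List Int)) (corner : String) :
    orient_grid grid corner = orient_grid_alt grid corner := by
  unfold orient_grid orient_grid_alt
  have hrow : ∀ (b : Bool) (row : List Int),
      row.foldl (fun acc x => if b then x :: acc else acc ++ [x]) ([] : List Int)
        = (if b then row.reverse else row) := by
    intro b row; rw [pv_foldl_flip]; cases b <;> simp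
  by_cases h1 : PySem.Str.upper corner = "TL" <;>
  by_cases h2 : PySem.Str.upper corner = "BL" <;>
  by_cases h3 : PySem.Str.upper corner = "TR" <;>
  by_cases h4 : PySem.Str.upper corner = "BR" <;>
  simp_all [pv_outer, hrow, List.map_reverse, pv_flat_map]

-- ===== VERDICT (by name: the statement is the Claim_ definition above) =====
theorem orient_grid_spec : Claim_equal_orient_grid := by
  intro grid corner _
  exact orient_grid_eq grid corner
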